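-- pv_equiv track=rewrite | github.com/GregoryMorse/sudoku | sudoku.py | get_border_count
-- ===== SOURCE A (Python) =====
-- def get_border_count(board, exc):
--   l = len(board)
--   rem = [[0] * l for _ in range(l)]
--   for i in range(l):
--     for j in range(l):
--       count = 0
--       if not board[i][j] is None: continue
--       if i == 0 or ((i-1, j), (i, j)) in exc or not board[i-1][j] is None: count += 5 if i == 0 or ((i-1, j), (i, j)) in exc else 1
--       if j == 0 or ((i, j-1), (i, j)) in exc or not board[i][j-1] is None: count += 5 if j == 0 or ((i, j-1), (i, j)) in exc else 1
--       if i == l-1 or ((i, j), (i+1, j)) in exc or not board[i+1][j] is None: count += 5 if i == l-1 or ((i, j), (i+1, j)) in exc else 1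
--       if j == l-1 or ((i, j), (i, j+1)) in exc or not board[i][j+1] is None: count += 5 if j == l-1 or ((i, j), (i, j+1)) in exc else 1
--       rem[i][j] = count
--   return rem
-- ===== SOURCE B (Python) =====
-- def _edge(board, rem, excset, i1, j1, i2, j2):
--     a, b = board[i1][j1], board[i2][j2]
--     if ((i1, j1), (i2, j2)) in excset:
--         if a is None:
--             rem[i1][j1] += 5
--         if b is None:
--             rem[i2][j2] += 5
--     else:
--         if a is None and b is not None:
--             rem[i1][j1] += 1
--         if b is None and a is not None:
--             rem[i2][j2] += 1
--
-- def get_border_count(board, exc):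
--     l = len(board)
--     excset = set(exc)
--     rem = [[(5 * ((i == 0) + (j == 0) + (i == l - 1) + (j == l - 1))
--              if board[i][j] is None else 0) for j in range(l)] for i in range(l)]
--     for i in range(1, l):
--         for j in range(l):
--             _edge(board, rem, excset, i - 1, j, i, j)
--     for i in range(l):
--         for j in range(1, l):
--             _edge(board, rem, excset, i, j - 1, i, j)
--     return rem
-- ===== Notes on version B (the rewrite author's own statement) =====
-- stated objective: alternative
-- what changed: B replaces A's per-cell gather of the four neighbour checks by a scatter decomposition: it first writes the boundary-side contributions (5 per board-edge side of an empty cell), then makes one pass over the internal vertical and horizontal edges, adding 5 to each empty endpoint of an exc edge and 1 to an empty cell adjacent to a filled one; exc is also indexed once as a set.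
import Mathlib
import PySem

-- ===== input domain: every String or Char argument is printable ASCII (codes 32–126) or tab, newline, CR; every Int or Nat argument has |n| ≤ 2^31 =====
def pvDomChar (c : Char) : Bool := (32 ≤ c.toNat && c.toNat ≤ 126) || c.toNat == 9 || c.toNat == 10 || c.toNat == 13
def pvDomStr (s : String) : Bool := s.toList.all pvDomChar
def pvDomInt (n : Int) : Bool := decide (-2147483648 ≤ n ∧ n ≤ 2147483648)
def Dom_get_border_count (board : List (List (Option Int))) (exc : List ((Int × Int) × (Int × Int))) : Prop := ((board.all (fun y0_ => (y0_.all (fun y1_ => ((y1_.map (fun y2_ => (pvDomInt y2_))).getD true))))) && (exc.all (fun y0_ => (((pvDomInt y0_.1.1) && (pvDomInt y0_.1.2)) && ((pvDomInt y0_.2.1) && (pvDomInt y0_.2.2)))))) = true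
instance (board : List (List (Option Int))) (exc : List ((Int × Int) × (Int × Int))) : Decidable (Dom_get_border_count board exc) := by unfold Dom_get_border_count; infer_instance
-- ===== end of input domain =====

-- B recomputes the same per-empty-cell border counts by SCATTERING over edges (boundary sides first,
-- then one pass over the internal edges) instead of A's per-cell gather of its four neighbours;
-- objective: alternative decomposition, same asymptotic cost.

-- ===== PORT A =====
-- board[i][j]; `none` also where Python would raise IndexError (those inputs are outside Pre_).
def pvCell (board : List (List (Option Int))) (i j : Int) : Option Int :=
  ((PySem.List.pyGet? board i).bind (fun row => PySem.List.pyGet? row j)).getD none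

-- the four `if …: count += 5 if … else 1` side additions of A (cell (i,j) already known empty)
def pvCountA (board : List (List (Option Int))) (exc : List ((Int × Int) × (Int × Int))) (l i j : Int) : Int :=
  (if i = 0 ∨ ((i-1,j),(i,j)) ∈ exc ∨ (pvCell board (i-1) j).isSome then
      (if i = 0 ∨ ((i-1,j),(i,j)) ∈ exc then 5 else 1) else 0)
  + (if j = 0 ∨ ((i,j-1),(i,j)) ∈ exc ∨ (pvCell board i (j-1)).isSome then
      (if j = 0 ∨ ((i,j-1),(i,j)) ∈ exc then 5 else 1) else 0)
  + (if i = l-1 ∨ ((i,j),(i+1,j)) ∈ exc ∨ (pvCell board (i+1) j).isSome then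
      (if i = l-1 ∨ ((i,j),(i+1,j)) ∈ exc then 5 else 1) else 0)
  + (if j = l-1 ∨ ((i,j),(i,j+1)) ∈ exc ∨ (pvCell board i (j+1)).isSome then
      (if j = l-1 ∨ ((i,j),(i,j+1)) ∈ exc then 5 else 1) else 0)

def get_border_count (board : List (List (Option Int))) (exc : List ((Int × Int) × (Int × Int))) : List (List Int) :=
  let l : Int := board.length
  let rem : List (List Int) := List.replicate board.length (List.replicate board.length 0)
  (PySem.List.pyRange 0 l 1).foldl (fun rem i =>
    (PySem.List.pyRange 0 l 1).foldl (fun rem j =>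
      if (pvCell board i j).isSome then rem            -- `continue`
      else rem.modify i.toNat (fun row => row.set j.toNat (pvCountA board exc l i j))) rem) rem

-- ===== PORT B =====
-- helper `_edge` of Source B: scatter one edge's contributions onto its (empty) endpoints
def pvEdge (board : List (List (Option Int))) (excset : PySem.Set ((Int × Int) × (Int × Int)))
    (rem : List (List Int)) (i1 j1 i2 j2 : Int) : List (List Int) :=
  let a := pvCell board i1 j1
  let b := pvCell board i2 j2
  if ((i1,j1),(i2,j2)) ∈ excset then
    let rem := if a = none then rem.modify i1.toNat (fun row => row.modify j1.toNat (· + 5)) else rem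
    if b = none then rem.modify i2.toNat (fun row => row.modify j2.toNat (· + 5)) else rem
  else
    let rem := if a = none ∧ b ≠ none then rem.modify i1.toNat (fun row => row.modify j1.toNat (· + 1)) else rem
    if b = none ∧ a ≠ none then rem.modify i2.toNat (fun row => row.modify j2.toNat (· + 1)) else rem

def get_border_count_alt (board : List (List (Option Int))) (exc : List ((Int × Int) × (Int × Int))) : List (List Int) :=
  let l : Int := board.length
  let excset : PySem.Set ((Int × Int) × (Int × Int)) := PySem.Set.ofList exc
  let rem := (PySem.List.pyRange 0 l 1).map (fun i => (PySem.List.pyRange 0 l 1).map (fun j =>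
      if pvCell board i j = none then
        5 * ((if i = 0 then 1 else 0) + (if j = 0 then 1 else 0)
             + (if i = l-1 then 1 else 0) + (if j = l-1 then 1 else 0))
      else 0))
  let rem := (PySem.List.pyRange 1 l 1).foldl (fun rem i =>
      (PySem.List.pyRange 0 l 1).foldl (fun rem j => pvEdge board excset rem (i-1) j i j) rem) rem
  (PySem.List.pyRange 0 l 1).foldl (fun rem i =>
      (PySem.List.pyRange 1 l 1).foldl (fun rem j => pvEdge board excset rem i (j-1) i j) rem) rem

-- ===== PRECONDITION & SPEC =====
-- Pre_ excludes exactly the boards with a row shorter than the board (Python A raises IndexError there).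
def Pre_get_border_count (board : List (List (Option Int))) (exc : List ((Int × Int) × (Int × Int))) : Prop :=
  ∀ row ∈ board, board.length ≤ row.length
instance (board : List (List (Option Int))) (exc : List ((Int × Int) × (Int × Int))) : Decidable (Pre_get_border_count board exc) := by unfold Pre_get_border_count; infer_instance

def pvWitness_get_border_count : List (List (Option Int)) × (List ((Int × Int) × (Int × Int))) :=
  ([[some 1, none],[none, none]], [(((0:Int),(0:Int)),((1:Int),(0:Int)))])

def Spec_get_border_count (board : List (List (Option Int))) (exc : List ((Int × Int) × (Int × Int))) (out : List (List Int)) : Prop := out = get_border_count_alt board exc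
instance (board : List (List (Option Int))) (exc : List ((Int × Int) × (Int × Int))) (out : List (List Int)) : Decidable (Spec_get_border_count board exc out) := by unfold Spec_get_border_count; infer_instance

-- ===== CLAIM (what is proved, stated in full; the proofs are below) =====
def Claim_equal_get_border_count : Prop := ∀ (board : List (List (Option Int))) (exc : List ((Int × Int) × (Int × Int))), Dom_get_border_count board exc → Pre_get_border_count board exc → Spec_get_border_count board exc (get_border_count board exc)

-- ===== LEMMAS AND PROOFS =====

-- grid entry (total; default 0) and shape predicate
def pvEntry (g : List (List Int)) (i j : Nat) : Int := (g.getD i []).getD j 0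
def pvShaped (l : Nat) (g : List (List Int)) : Prop := g.length = l ∧ ∀ row ∈ g, row.length = l

theorem pvShaped_zero (l : Nat) : pvShaped l (List.replicate l (List.replicate l (0:Int))) := by
  constructor
  · simp
  · intro row hrow
    simp_all [List.eq_of_mem_replicate hrow]

theorem pvEntry_zero (l i j : Nat) : pvEntry (List.replicate l (List.replicate l (0:Int))) i j = 0 := by
  unfold pvEntry
  simp [List.getD_eq_getElem?_getD, List.getElem?_replicate]
  split <;> simp

theorem pvGrid_ext {l : Nat} {g1 g2 : List (List Int)} (h1 : pvShaped l g1) (h2 : pvShaped l g2)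
    (h : ∀ i j, i < l → j < l → pvEntry g1 i j = pvEntry g2 i j) : g1 = g2 := by
  obtain ⟨hl1, hr1⟩ := h1
  obtain ⟨hl2, hr2⟩ := h2
  apply List.ext_getElem (by omega)
  intro i hi1 hi2
  have hrl1 : g1[i].length = l := hr1 _ (List.getElem_mem _)
  have hrl2 : g2[i].length = l := hr2 _ (List.getElem_mem _)
  apply List.ext_getElem (by omega)
  intro j hj1 hj2
  have := h i j (by omega) (by omega)
  unfold pvEntry at this
  rw [List.getD_eq_getElem _ _ hi1, List.getD_eq_getElem _ _ hi2] at this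
  rwa [List.getD_eq_getElem _ _ hj1, List.getD_eq_getElem _ _ hj2] at this

theorem pvShaped_modify {l : Nat} {g : List (List Int)} (h : pvShaped l g)
    (i : Nat) (f : List Int → List Int) (hf : ∀ row, row.length = l → (f row).length = l) :
    pvShaped l (g.modify i f) := by
  obtain ⟨hl, hr⟩ := h
  refine ⟨by simpa using hl, ?_⟩
  intro row hrow
  rw [List.mem_iff_getElem] at hrow
  obtain ⟨k, hk, hrow⟩ := hrow
  rw [List.getElem_modify] at hrow
  have hk' : k < g.length := by simpa using hk
  have hgk : g[k].length = l := hr _ (List.getElem_mem _)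
  by_cases hik : i = k
  · simp only [hik, if_pos rfl] at hrow
    rw [← hrow]; exact hf _ hgk
  · simp only [if_neg hik] at hrow
    rw [← hrow]; exact hgk

theorem pvEntry_modify {l : Nat} {g : List (List Int)} (h : pvShaped l g)
    (i j : Nat) (hi : i < l) (hj : j < l) (f : Int → Int) (i' j' : Nat) (hi' : i' < l) (hj' : j' < l) :
    pvEntry (g.modify i (fun row => row.modify j f)) i' j' =
      if i' = i ∧ j' = j then f (pvEntry g i j) else pvEntry g i' j' := by
  obtain ⟨hl, hr⟩ := h
  have hg1 : i' < (g.modify i (fun row => row.modify j f)).length := by simp; omega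
  have hgi' : i' < g.length := by omega
  have hgi : i < g.length := by omega
  have hri' : g[i'].length = l := hr _ (List.getElem_mem _)
  have hri : g[i].length = l := hr _ (List.getElem_mem _)
  unfold pvEntry
  rw [List.getD_eq_getElem _ _ hg1, List.getElem_modify]
  by_cases hii : i = i'
  · subst hii
    rw [if_pos rfl]
    rw [List.getD_eq_getElem _ _ (by rw [List.length_modify]; omega), List.getElem_modify]
    by_cases hjj : j = j'
    · subst hjj
      rw [if_pos rfl, if_pos ⟨rfl, rfl⟩]
      rw [List.getD_eq_getElem _ _ hgi, List.getD_eq_getElem _ _ (by omega)]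
    · rw [if_neg hjj, if_neg (by tauto : ¬ (i = i ∧ j' = j))]
      rw [List.getD_eq_getElem _ _ hgi', List.getD_eq_getElem _ _ (by omega)]
  · rw [if_neg hii, if_neg (fun hc => hii hc.1.symm)]
    rw [List.getD_eq_getElem _ _ hgi', List.getD_eq_getElem _ _ (by omega)]

theorem pvEntry_modify_set {l : Nat} {g : List (List Int)} (h : pvShaped l g)
    (i j : Nat) (hi : i < l) (hj : j < l) (v : Int) (i' j' : Nat) (hi' : i' < l) (hj' : j' < l) :
    pvEntry (g.modify i (fun row => row.set j v)) i' j' =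
      if i' = i ∧ j' = j then v else pvEntry g i' j' := by
  obtain ⟨hl, hr⟩ := h
  have hg1 : i' < (g.modify i (fun row => row.set j v)).length := by simp; omega
  have hgi' : i' < g.length := by omega
  have hri' : g[i'].length = l := hr _ (List.getElem_mem _)
  have hri : ∀ (h : i < g.length), g[i].length = l := fun _ => hr _ (List.getElem_mem _)
  unfold pvEntry
  rw [List.getD_eq_getElem _ _ hg1, List.getElem_modify]
  by_cases hii : i = i'
  · subst hii
    rw [if_pos rfl]
    rw [List.getD_eq_getElem _ _ (by rw [List.length_set]; have := hri hgi'; omega), List.getElem_set]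
    by_cases hjj : j = j'
    · subst hjj
      rw [if_pos rfl, if_pos ⟨rfl, rfl⟩]
    · rw [if_neg hjj, if_neg (by tauto : ¬ (i = i ∧ j' = j))]
      rw [List.getD_eq_getElem _ _ hgi', List.getD_eq_getElem _ _ (by have := hri hgi'; omega)]
  · rw [if_neg hii, if_neg (fun hc => hii hc.1.symm)]
    rw [List.getD_eq_getElem _ _ hgi', List.getD_eq_getElem _ _ (by omega)]


theorem pvShaped_add {l : Nat} {g : List (List Int)} (h : pvShaped l g) (a b : Nat) (v : Int) :
    pvShaped l (g.modify a (fun row => row.modify b (· + v))) :=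
  pvShaped_modify h a _ (fun row hrow => by simp [hrow])

theorem pvEntry_add {l : Nat} {g : List (List Int)} (h : pvShaped l g)
    (a b : Nat) (ha : a < l) (hb : b < l) (v : Int) (i' j' : Nat) (hi' : i' < l) (hj' : j' < l) :
    pvEntry (g.modify a (fun row => row.modify b (· + v))) i' j' =
      pvEntry g i' j' + (if i' = a ∧ j' = b then v else 0) := by
  rw [pvEntry_modify h a b ha hb _ i' j' hi' hj']
  by_cases hc : i' = a ∧ j' = b
  · obtain ⟨h1, h2⟩ := hc
    subst h1; subst h2
    simp
  · simp [hc]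

-- contribution of the edge ((i1,j1),(i2,j2)) to its first / second endpoint in Source B's `_edge`
def pvDelta1 (board : List (List (Option Int))) (excset : PySem.Set ((Int × Int) × (Int × Int))) (i1 j1 i2 j2 : Int) : Int :=
  if ((i1,j1),(i2,j2)) ∈ excset then (if pvCell board i1 j1 = none then 5 else 0)
  else (if pvCell board i1 j1 = none ∧ pvCell board i2 j2 ≠ none then 1 else 0)

def pvDelta2 (board : List (List (Option Int))) (excset : PySem.Set ((Int × Int) × (Int × Int))) (i1 j1 i2 j2 : Int) : Int :=
  if ((i1,j1),(i2,j2)) ∈ excset then (if pvCell board i2 j2 = none then 5 else 0)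
  else (if pvCell board i2 j2 = none ∧ pvCell board i1 j1 ≠ none then 1 else 0)

theorem pvEdge_entry {l : Nat} {g : List (List Int)} (hs : pvShaped l g)
    (board : List (List (Option Int))) (excset : PySem.Set ((Int × Int) × (Int × Int)))
    (i1 j1 i2 j2 : Int) (hb1 : i1.toNat < l) (hb2 : j1.toNat < l) (hb3 : i2.toNat < l) (hb4 : j2.toNat < l) :
    pvShaped l (pvEdge board excset g i1 j1 i2 j2) ∧ ∀ i' j', i' < l → j' < l →
      pvEntry (pvEdge board excset g i1 j1 i2 j2) i' j' = pvEntry g i' j'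
        + (if i' = i1.toNat ∧ j' = j1.toNat then pvDelta1 board excset i1 j1 i2 j2 else 0)
        + (if i' = i2.toNat ∧ j' = j2.toNat then pvDelta2 board excset i1 j1 i2 j2 else 0) := by
  have hadd : ∀ g' : List (List Int), pvShaped l g' → ∀ (a b : Nat), a < l → b < l → ∀ v : Int,
      pvShaped l (g'.modify a (fun row => row.modify b (· + v))) ∧ ∀ i' j', i' < l → j' < l →
        pvEntry (g'.modify a (fun row => row.modify b (· + v))) i' j' =
          pvEntry g' i' j' + (if i' = a ∧ j' = b then v else 0) :=
    fun g' hg' a b ha hb v => ⟨pvShaped_add hg' a b v, fun i' j' hi' hj' => pvEntry_add hg' a b ha hb v i' j' hi' hj'⟩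
  by_cases hm : ((i1,j1),(i2,j2)) ∈ excset <;>
    by_cases ha : pvCell board i1 j1 = none <;>
    by_cases hb : pvCell board i2 j2 = none <;>
    simp only [pvEdge, pvDelta1, pvDelta2, hm, ha, hb, if_true, if_false, ite_true, ite_false,
      not_true, not_false_iff, true_and, false_and, and_true, and_false, ne_eq,
      not_true_eq_false, not_false_eq_true, ite_self] <;>
  · first
    | (obtain ⟨hs1, he1⟩ := hadd g hs i1.toNat j1.toNat hb1 hb2 (5:Int)
       obtain ⟨hs2, he2⟩ := hadd (g.modify i1.toNat fun row => row.modify j1.toNat fun x => x + 5) hs1 i2.toNat j2.toNat hb3 hb4 (5:Int)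
       refine ⟨hs2, fun i' j' hi' hj' => ?_⟩
       rw [he2 i' j' hi' hj', he1 i' j' hi' hj'])
    | (obtain ⟨hs1, he1⟩ := hadd g hs i1.toNat j1.toNat hb1 hb2 (1:Int)
       refine ⟨hs1, fun i' j' hi' hj' => ?_⟩
       rw [he1 i' j' hi' hj']
       ring)
    | (obtain ⟨hs1, he1⟩ := hadd g hs i2.toNat j2.toNat hb3 hb4 (1:Int)
       refine ⟨hs1, fun i' j' hi' hj' => ?_⟩
       rw [he1 i' j' hi' hj']
       ring)
    | (obtain ⟨hs1, he1⟩ := hadd g hs i1.toNat j1.toNat hb1 hb2 ((5:Int))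
       refine ⟨hs1, fun i' j' hi' hj' => ?_⟩
       rw [he1 i' j' hi' hj']
       ring)
    | (obtain ⟨hs1, he1⟩ := hadd g hs i2.toNat j2.toNat hb3 hb4 ((5:Int))
       refine ⟨hs1, fun i' j' hi' hj' => ?_⟩
       rw [he1 i' j' hi' hj']
       ring)
    | exact ⟨hs, fun i' j' hi' hj' => by ring⟩
    | skip

theorem pvSum_single (n j : Nat) (f : Nat → Int) :
    ((List.range n).map (fun k => if j = k then f k else 0)).sum = if j < n then f j else 0 := by
  induction n with
  | zero => simp
  | succ m ih =>
    rw [List.range_succ, List.map_append, List.sum_append, ih]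
    by_cases h : j = m
    · subst h
      simp
    · by_cases h2 : j < m
      · rw [if_pos h2, if_pos (by omega)]
        simp [h]
      · rw [if_neg h2, if_neg (by omega)]
        simp [h]

theorem pvFoldl_entry {α : Type} (l : Nat) (step : List (List Int) → α → List (List Int)) (δ : α → Nat → Nat → Int) :
    ∀ (L : List α), (∀ g x, x ∈ L → pvShaped l g → pvShaped l (step g x) ∧ ∀ i j, i < l → j < l →
        pvEntry (step g x) i j = pvEntry g i j + δ x i j) →
      ∀ g, pvShaped l g → pvShaped l (L.foldl step g) ∧ ∀ i j, i < l → j < l →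
        pvEntry (L.foldl step g) i j = pvEntry g i j + (L.map (fun x => δ x i j)).sum := by
  intro L
  induction L with
  | nil => intro _ g hg; simpa using hg
  | cons x L ih =>
    intro hstep g hg
    obtain ⟨hs1, he1⟩ := hstep g x (List.mem_cons_self) hg
    obtain ⟨hs2, he2⟩ := ih (fun g' y hy hg' => hstep g' y (List.mem_cons_of_mem _ hy) hg') (step g x) hs1
    refine ⟨hs2, ?_⟩
    intro i j hi hj
    rw [List.foldl_cons] at *
    rw [he2 i j hi hj, he1 i j hi hj]
    simp [add_assoc]


-- ===== A-side characterization =====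
def pvStepA (board : List (List (Option Int))) (exc : List ((Int × Int) × (Int × Int))) (n : Nat)
    (g : List (List Int)) (k k2 : Nat) : List (List Int) :=
  if (pvCell board ↑k ↑k2).isSome then g
  else g.modify k (fun row => row.set k2 (pvCountA board exc ↑n ↑k ↑k2))

def pvFinalA (board : List (List (Option Int))) (exc : List ((Int × Int) × (Int × Int))) (n : Nat) (i j : Nat) : Int :=
  if (pvCell board ↑i ↑j).isSome then 0 else pvCountA board exc ↑n ↑i ↑j

theorem pvA_inner (board : List (List (Option Int))) (exc : List ((Int × Int) × (Int × Int))) (n : Nat) (k : Nat) (hk : k < n) :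
    ∀ (m : Nat), m ≤ n → ∀ g, pvShaped n g →
      pvShaped n ((List.range m).foldl (fun g k2 => pvStepA board exc n g k k2) g) ∧
      ∀ i' j', i' < n → j' < n →
        pvEntry ((List.range m).foldl (fun g k2 => pvStepA board exc n g k k2) g) i' j' =
          if i' = k ∧ j' < m then (if (pvCell board ↑k ↑j').isSome then pvEntry g k j' else pvCountA board exc ↑n ↑k ↑j')
          else pvEntry g i' j' := by
  intro m
  induction m with
  | zero =>
    intro _ g hg
    refine ⟨by simpa using hg, ?_⟩
    intro i' j' hi' hj'
    simp
  | succ m ih =>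
    intro hm g hg
    obtain ⟨hs1, he1⟩ := ih (by omega) g hg
    rw [List.range_succ, List.foldl_append, List.foldl_cons, List.foldl_nil]
    set gm := (List.range m).foldl (fun g k2 => pvStepA board exc n g k k2) g with hgm
    unfold pvStepA
    by_cases hc : (pvCell board ↑k ↑m).isSome
    · rw [if_pos hc]
      refine ⟨hs1, ?_⟩
      intro i' j' hi' hj'
      rw [he1 i' j' hi' hj']
      by_cases h1 : i' = k ∧ j' < m
      · rw [if_pos h1, if_pos (show i' = k ∧ j' < m + 1 by omega)]
      · by_cases h2 : i' = k ∧ j' = m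
        · obtain ⟨rfl, rfl⟩ := h2
          rw [if_neg (show ¬ (i' = i' ∧ j' < j') by omega),
              if_pos (show i' = i' ∧ j' < j' + 1 by omega), if_pos hc]
        · rw [if_neg h1, if_neg (show ¬ (i' = k ∧ j' < m + 1) by omega)]
    · rw [if_neg hc]
      refine ⟨pvShaped_modify hs1 _ _ (fun row hrow => by simp [hrow]), ?_⟩
      intro i' j' hi' hj'
      rw [pvEntry_modify_set hs1 k m hk (by omega) _ i' j' hi' hj']
      by_cases h2 : i' = k ∧ j' = m
      · obtain ⟨rfl, rfl⟩ := h2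
        rw [if_pos (show i' = i' ∧ j' = j' by omega),
            if_pos (show i' = i' ∧ j' < j' + 1 by omega), if_neg hc]
      · rw [if_neg h2, he1 i' j' hi' hj']
        by_cases h1 : i' = k ∧ j' < m
        · rw [if_pos h1, if_pos (show i' = k ∧ j' < m + 1 by omega)]
        · rw [if_neg h1, if_neg (show ¬ (i' = k ∧ j' < m + 1) by omega)]

theorem pvA_outer (board : List (List (Option Int))) (exc : List ((Int × Int) × (Int × Int))) (n : Nat) :
    ∀ (m : Nat), m ≤ n →
      pvShaped n ((List.range m).foldl (fun g k => (List.range n).foldl (fun g k2 => pvStepA board exc n g k k2) g)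
          (List.replicate n (List.replicate n (0:Int)))) ∧
      ∀ i' j', i' < n → j' < n →
        pvEntry ((List.range m).foldl (fun g k => (List.range n).foldl (fun g k2 => pvStepA board exc n g k k2) g)
            (List.replicate n (List.replicate n (0:Int)))) i' j' =
          if i' < m then pvFinalA board exc n i' j' else 0 := by
  intro m
  induction m with
  | zero =>
    intro _
    refine ⟨pvShaped_zero n, ?_⟩
    intro i' j' hi' hj'
    simp [pvEntry_zero]
  | succ m ih =>
    intro hm
    obtain ⟨hs1, he1⟩ := ih (by omega)
    rw [List.range_succ, List.foldl_append, List.foldl_cons, List.foldl_nil]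
    obtain ⟨hs2, he2⟩ := pvA_inner board exc n m (by omega) n le_rfl _ hs1
    refine ⟨hs2, ?_⟩
    intro i' j' hi' hj'
    rw [he2 i' j' hi' hj']
    by_cases h2 : i' = m ∧ j' < n
    · rw [if_pos h2, h2.1]
      rw [he1 m j' (by omega) hj']
      rw [if_neg (show ¬ m < m by omega), if_pos (show m < m + 1 by omega)]
      rfl
    · have hj'n : ¬ (i' = m) := fun hik => h2 ⟨hik, hj'⟩
      rw [if_neg h2, he1 i' j' hi' hj']
      by_cases h1 : i' < m
      · rw [if_pos h1, if_pos (show i' < m + 1 by omega)]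
      · rw [if_neg h1, if_neg (show ¬ i' < m + 1 by omega)]

theorem pvA_main (board : List (List (Option Int))) (exc : List ((Int × Int) × (Int × Int))) :
    pvShaped board.length (get_border_count board exc) ∧
    ∀ i' j', i' < board.length → j' < board.length →
      pvEntry (get_border_count board exc) i' j' = pvFinalA board exc board.length i' j' := by
  have h : get_border_count board exc =
      (List.range board.length).foldl (fun g k => (List.range board.length).foldl
          (fun g k2 => pvStepA board exc board.length g k k2) g)
        (List.replicate board.length (List.replicate board.length (0:Int))) := by
    show (PySem.List.pyRange 0 (board.length:Int) 1).foldl _ _ = _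
    simp only [PySem.List.pyRange_zero_natCast, List.foldl_map, Int.toNat_natCast, pvStepA]
  rw [h]
  obtain ⟨hs, he⟩ := pvA_outer board exc board.length board.length le_rfl
  refine ⟨hs, ?_⟩
  intro i' j' hi' hj'
  rw [he i' j' hi' hj', if_pos hi']


-- ===== B-side sum helpers =====
theorem pvSum_colD (l : Nat) (A : Prop) [Decidable A] (c : Int → Int) (j' : Nat) (hj' : j' < l) :
    ((PySem.List.pyRange 0 (l:Int) 1).map (fun x => if A ∧ j' = x.toNat then c x else 0)).sum =
      if A then c ↑j' else 0 := by
  rw [PySem.List.pyRange_zero_natCast, List.map_map]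
  by_cases hA : A
  · have hfn : ((fun x : Int => if A ∧ j' = x.toNat then c x else 0) ∘ (fun k : Nat => (k:Int))) =
        fun k : Nat => if j' = k then c ↑k else 0 := by
      funext k
      simp [Function.comp, hA]
    rw [hfn, pvSum_single l j' (fun k => c ↑k), if_pos hj', if_pos hA]
  · have hfn : ((fun x : Int => if A ∧ j' = x.toNat then c x else 0) ∘ (fun k : Nat => (k:Int))) =
        fun _ : Nat => (0:Int) := by
      funext k
      simp [Function.comp, hA]
    rw [hfn, if_neg hA]
    simp

theorem pvSum_row1 (l : Nat) (c : Int → Int) (n' : Nat) (hn' : n' < l) :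
    ((PySem.List.pyRange 1 (l:Int) 1).map (fun x => if n' = (x-1).toNat then c x else 0)).sum =
      if n' + 1 < l then c (1 + ↑n') else 0 := by
  rw [PySem.List.pyRange_one, List.map_map]
  have hl : ((l:Int) - 1).toNat = l - 1 := by omega
  rw [hl]
  have hfn : ((fun x : Int => if n' = (x-1).toNat then c x else 0) ∘ (fun k : Nat => (1:Int) + ↑k)) =
      fun k : Nat => if n' = k then c (1 + ↑k) else 0 := by
    funext k
    have : ((1:Int) + ↑k - 1).toNat = k := by omega
    simp [Function.comp, this]
  rw [hfn, pvSum_single (l-1) n' (fun k => c (1 + ↑k))]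
  by_cases h : n' + 1 < l
  · rw [if_pos (by omega : n' < l - 1), if_pos h]
  · rw [if_neg (by omega : ¬ n' < l - 1), if_neg h]

theorem pvSum_row2 (l : Nat) (c : Int → Int) (n' : Nat) (hn' : n' < l) :
    ((PySem.List.pyRange 1 (l:Int) 1).map (fun x => if n' = x.toNat then c x else 0)).sum =
      if 1 ≤ n' then c ↑n' else 0 := by
  rw [PySem.List.pyRange_one, List.map_map]
  have hl : ((l:Int) - 1).toNat = l - 1 := by omega
  rw [hl]
  cases n' with
  | zero =>
    have hfn : ((fun x : Int => if (0:Nat) = x.toNat then c x else 0) ∘ (fun k : Nat => (1:Int) + ↑k)) =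
        fun _ : Nat => (0:Int) := by
      funext k
      have : ¬ ((0:Nat) = ((1:Int) + ↑k).toNat) := by omega
      simp [Function.comp, this]
    rw [hfn]
    simp
  | succ m =>
    have hfn : ((fun x : Int => if (m+1 : Nat) = x.toNat then c x else 0) ∘ (fun k : Nat => (1:Int) + ↑k)) =
        fun k : Nat => if m = k then c (1 + ↑k) else 0 := by
      funext k
      have h1 : ((1:Int) + ↑k).toNat = k + 1 := by omega
      rw [Function.comp_apply, h1]
      by_cases h : m = k
      · rw [if_pos (by omega), if_pos h]
      · rw [if_neg (by omega), if_neg h]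
    rw [hfn, pvSum_single (l-1) m (fun k => c (1 + ↑k)), if_pos (by omega : m < l - 1),
        if_pos (by omega : 1 ≤ m + 1)]
    congr 1
    push_cast
    ring

-- entry/shape of the comprehension-built base grid of B
theorem pvMapGrid (l : Nat) (F : Int → Int → Int) :
    pvShaped l ((PySem.List.pyRange 0 (l:Int) 1).map (fun i => (PySem.List.pyRange 0 (l:Int) 1).map (fun j => F i j))) ∧
    ∀ i j, i < l → j < l →
      pvEntry ((PySem.List.pyRange 0 (l:Int) 1).map (fun i => (PySem.List.pyRange 0 (l:Int) 1).map (fun j => F i j))) i j = F ↑i ↑j := by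
  rw [PySem.List.pyRange_zero_natCast, List.map_map]
  constructor
  · constructor
    · simp
    · intro row hrow
      rw [List.mem_map] at hrow
      obtain ⟨k, _, hrow⟩ := hrow
      rw [← hrow]
      simp
  · intro i j hi hj
    simp [pvEntry, List.getD_eq_getElem?_getD, List.getElem?_map, List.getElem?_range, hi, hj]


theorem pvIte_add (A : Prop) [Decidable A] (x y : Int) :
    (if A then x else 0) + (if A then y else 0) = if A then x + y else 0 := by
  split_ifs <;> ring

theorem pvSum_row1D (l : Nat) (A : Prop) [Decidable A] (c : Int → Int) (n' : Nat) (hn' : n' < l) :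
    ((PySem.List.pyRange 1 (l:Int) 1).map (fun x => if A ∧ n' = (x-1).toNat then c x else 0)).sum =
      if A then (if n' + 1 < l then c (1 + ↑n') else 0) else 0 := by
  by_cases hA : A
  · simp only [eq_true hA, true_and, if_true]
    exact pvSum_row1 l c n' hn'
  · simp only [eq_false hA, false_and, if_false]
    simp

theorem pvSum_row2D (l : Nat) (A : Prop) [Decidable A] (c : Int → Int) (n' : Nat) (hn' : n' < l) :
    ((PySem.List.pyRange 1 (l:Int) 1).map (fun x => if A ∧ n' = x.toNat then c x else 0)).sum =
      if A then (if 1 ≤ n' then c ↑n' else 0) else 0 := by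
  by_cases hA : A
  · simp only [eq_true hA, true_and, if_true]
    exact pvSum_row2 l c n' hn'
  · simp only [eq_false hA, false_and, if_false]
    simp

theorem pvSum_col0 (l : Nat) (c : Int → Int) (n' : Nat) (hn' : n' < l) :
    ((PySem.List.pyRange 0 (l:Int) 1).map (fun x => if n' = x.toNat then c x else 0)).sum = c ↑n' := by
  rw [PySem.List.pyRange_zero_natCast, List.map_map]
  have hfn : ((fun x : Int => if n' = x.toNat then c x else 0) ∘ (fun k : Nat => (k:Int))) =
      fun k : Nat => if n' = k then c ↑k else 0 := by
    funext k
    simp [Function.comp]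
  rw [hfn, pvSum_single l n' (fun k => c ↑k), if_pos hn']


-- the base-grid cell value of B (boundary sides only)
def pvBase (board : List (List (Option Int))) (n : Nat) (i j : Int) : Int :=
  if pvCell board i j = none then
    5 * ((if i = 0 then 1 else 0) + (if j = 0 then 1 else 0)
         + (if i = (n:Int)-1 then 1 else 0) + (if j = (n:Int)-1 then 1 else 0))
  else 0

theorem pvB_main (board : List (List (Option Int))) (exc : List ((Int × Int) × (Int × Int))) :
    pvShaped board.length (get_border_count_alt board exc) ∧
    ∀ i j, i < board.length → j < board.length →
      pvEntry (get_border_count_alt board exc) i j =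
        pvBase board board.length ↑i ↑j
        + ((if i + 1 < board.length then pvDelta1 board (PySem.Set.ofList exc) ↑i ↑j (1 + ↑i) ↑j else 0)
           + (if 1 ≤ i then pvDelta2 board (PySem.Set.ofList exc) (↑i - 1) ↑j ↑i ↑j else 0))
        + ((if j + 1 < board.length then pvDelta1 board (PySem.Set.ofList exc) ↑i ↑j ↑i (1 + ↑j) else 0)
           + (if 1 ≤ j then pvDelta2 board (PySem.Set.ofList exc) ↑i (↑j - 1) ↑i ↑j else 0)) := by
  unfold get_border_count_alt
  dsimp only
  set S := PySem.Set.ofList exc with hSdef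
  set n := board.length with hn
  obtain ⟨hs0, he0⟩ := pvMapGrid n (fun i j => if pvCell board i j = none then
      5 * ((if i = 0 then 1 else 0) + (if j = 0 then 1 else 0)
           + (if i = (n:Int)-1 then 1 else 0) + (if j = (n:Int)-1 then 1 else 0)) else 0)
  -- vertical stage
  have hVstep : ∀ g x, x ∈ PySem.List.pyRange 1 (n:Int) 1 → pvShaped n g →
      pvShaped n ((PySem.List.pyRange 0 (n:Int) 1).foldl (fun g y => pvEdge board S g (x-1) y x y) g) ∧
      ∀ i j, i < n → j < n →
        pvEntry ((PySem.List.pyRange 0 (n:Int) 1).foldl (fun g y => pvEdge board S g (x-1) y x y) g) i j =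
          pvEntry g i j +
            ((if i = (x-1).toNat then pvDelta1 board S (x-1) ↑j x ↑j else 0)
             + (if i = x.toNat then pvDelta2 board S (x-1) ↑j x ↑j else 0)) := by
    intro g x hx hg
    rw [PySem.List.mem_pyRange_one] at hx
    have hb1 : (x-1).toNat < n := by omega
    have hb3 : x.toNat < n := by omega
    obtain ⟨hsI, heI⟩ := pvFoldl_entry n (fun g y => pvEdge board S g (x-1) y x y)
      (fun y i j => (if i = (x-1).toNat ∧ j = y.toNat then pvDelta1 board S (x-1) y x y else 0)
                  + (if i = x.toNat ∧ j = y.toNat then pvDelta2 board S (x-1) y x y else 0))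
      (PySem.List.pyRange 0 (n:Int) 1)
      (fun g' y hy hg' => by
        rw [PySem.List.mem_pyRange_one] at hy
        obtain ⟨hsE, heE⟩ := pvEdge_entry hg' board S (x-1) y x y hb1 (by omega) hb3 (by omega)
        exact ⟨hsE, fun i j hi hj => by rw [heE i j hi hj, add_assoc]⟩)
      g hg
    refine ⟨hsI, fun i j hi hj => ?_⟩
    rw [heI i j hi hj, PySem.List.sum_map_add_int,
        pvSum_colD n _ (fun y => pvDelta1 board S (x-1) y x y) j hj,
        pvSum_colD n _ (fun y => pvDelta2 board S (x-1) y x y) j hj]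
  obtain ⟨hsV, heV⟩ := pvFoldl_entry n
      (fun g x => (PySem.List.pyRange 0 (n:Int) 1).foldl (fun g y => pvEdge board S g (x-1) y x y) g)
      (fun x i j => (if i = (x-1).toNat then pvDelta1 board S (x-1) ↑j x ↑j else 0)
                  + (if i = x.toNat then pvDelta2 board S (x-1) ↑j x ↑j else 0))
      (PySem.List.pyRange 1 (n:Int) 1) (fun g x hx hg => hVstep g x hx hg) _ hs0
  -- horizontal stage
  have hHstep : ∀ g x, x ∈ PySem.List.pyRange 0 (n:Int) 1 → pvShaped n g →
      pvShaped n ((PySem.List.pyRange 1 (n:Int) 1).foldl (fun g y => pvEdge board S g x (y-1) x y) g) ∧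
      ∀ i j, i < n → j < n →
        pvEntry ((PySem.List.pyRange 1 (n:Int) 1).foldl (fun g y => pvEdge board S g x (y-1) x y) g) i j =
          pvEntry g i j +
            (if i = x.toNat then
              ((if j + 1 < n then pvDelta1 board S x ↑j x (1 + ↑j) else 0)
               + (if 1 ≤ j then pvDelta2 board S x (↑j - 1) x ↑j else 0)) else 0) := by
    intro g x hx hg
    rw [PySem.List.mem_pyRange_one] at hx
    have hb1 : x.toNat < n := by omega
    obtain ⟨hsI, heI⟩ := pvFoldl_entry n (fun g y => pvEdge board S g x (y-1) x y)
      (fun y i j => (if i = x.toNat ∧ j = (y-1).toNat then pvDelta1 board S x (y-1) x y else 0)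
                  + (if i = x.toNat ∧ j = y.toNat then pvDelta2 board S x (y-1) x y else 0))
      (PySem.List.pyRange 1 (n:Int) 1)
      (fun g' y hy hg' => by
        rw [PySem.List.mem_pyRange_one] at hy
        obtain ⟨hsE, heE⟩ := pvEdge_entry hg' board S x (y-1) x y hb1 (by omega) hb1 (by omega)
        exact ⟨hsE, fun i j hi hj => by rw [heE i j hi hj, add_assoc]⟩)
      g hg
    refine ⟨hsI, fun i j hi hj => ?_⟩
    rw [heI i j hi hj, PySem.List.sum_map_add_int,
        pvSum_row1D n _ (fun y => pvDelta1 board S x (y-1) x y) j hj,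
        pvSum_row2D n _ (fun y => pvDelta2 board S x (y-1) x y) j hj,
        pvIte_add]
    simp only [add_sub_cancel_left]
  obtain ⟨hsH, heH⟩ := pvFoldl_entry n
      (fun g x => (PySem.List.pyRange 1 (n:Int) 1).foldl (fun g y => pvEdge board S g x (y-1) x y) g)
      (fun x i j => (if i = x.toNat then
              ((if j + 1 < n then pvDelta1 board S x ↑j x (1 + ↑j) else 0)
               + (if 1 ≤ j then pvDelta2 board S x (↑j - 1) x ↑j else 0)) else 0))
      (PySem.List.pyRange 0 (n:Int) 1) (fun g x hx hg => hHstep g x hx hg) _ hsV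
  refine ⟨hsH, fun i j hi hj => ?_⟩
  have hent := heH i j hi hj
  rw [heV i j hi hj, he0 i j hi hj] at hent
  rw [hent, PySem.List.sum_map_add_int,
      pvSum_row1 n (fun x => pvDelta1 board S (x-1) ↑j x ↑j) i hi,
      pvSum_row2 n (fun x => pvDelta2 board S (x-1) ↑j x ↑j) i hi,
      pvSum_col0 n (fun x => (if j + 1 < n then pvDelta1 board S x ↑j x (1 + ↑j) else 0)
               + (if 1 ≤ j then pvDelta2 board S x (↑j - 1) x ↑j else 0)) i hi]
  simp only [add_sub_cancel_left]
  rfl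


-- one side of A's per-cell count, regrouped as boundary + edge contribution
theorem pvSideGen (b g e : Prop) [Decidable b] [Decidable g] [Decidable e] (c cme : Option Int)
    (hbg : b ↔ ¬ g) (hcme : cme = none) :
    (if b ∨ e ∨ c.isSome then (if b ∨ e then (5:Int) else 1) else 0)
    = 5 * (if b then 1 else 0)
      + (if g then (if e then (if cme = none then (5:Int) else 0)
                    else (if cme = none ∧ c ≠ none then 1 else 0)) else 0) := by
  have hg : g ↔ ¬ b := by tauto
  by_cases hb : b <;> by_cases he : e <;> cases c <;>
    simp [hb, he, hcme, hg.mpr, hbg.mp]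

theorem pvCell_identity (board : List (List (Option Int))) (exc : List ((Int × Int) × (Int × Int)))
    (n : Nat) (i j : Nat) (hi : i < n) (hj : j < n) :
    pvFinalA board exc n i j =
      pvBase board n ↑i ↑j
      + ((if i + 1 < n then pvDelta1 board (PySem.Set.ofList exc) ↑i ↑j (1 + ↑i) ↑j else 0)
         + (if 1 ≤ i then pvDelta2 board (PySem.Set.ofList exc) (↑i - 1) ↑j ↑i ↑j else 0))
      + ((if j + 1 < n then pvDelta1 board (PySem.Set.ofList exc) ↑i ↑j ↑i (1 + ↑j) else 0)
         + (if 1 ≤ j then pvDelta2 board (PySem.Set.ofList exc) ↑i (↑j - 1) ↑i ↑j else 0)) := by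
  unfold pvFinalA pvCountA pvBase pvDelta1 pvDelta2
  simp only [PySem.Set.mem_ofList]
  rw [show ((1:Int) + ↑i) = ↑i + 1 from add_comm 1 (i:Int), show ((1:Int) + ↑j) = ↑j + 1 from add_comm 1 (j:Int)]
  rcases hcell : pvCell board ↑i ↑j with _ | v
  · rw [if_neg (show ¬ ((Option.none : Option Int).isSome = true) by simp)]
    rw [pvSideGen ((i:Int) = 0) (1 ≤ i) _ _ _ (by omega) rfl,
        pvSideGen ((j:Int) = 0) (1 ≤ j) _ _ _ (by omega) rfl,
        pvSideGen ((i:Int) = (n:Int) - 1) (i + 1 < n) _ _ _ (by omega) rfl,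
        pvSideGen ((j:Int) = (n:Int) - 1) (j + 1 < n) _ _ _ (by omega) rfl]
    simp only [true_and, if_true]
    ring
  · simp

-- ===== VERDICT (by name: the statement is the Claim_ definition above) =====
theorem get_border_count_spec : Claim_equal_get_border_count := by
  intro board exc _ _
  unfold Spec_get_border_count
  obtain ⟨hsA, heA⟩ := pvA_main board exc
  obtain ⟨hsB, heB⟩ := pvB_main board exc
  apply pvGrid_ext hsA hsB
  intro i j hi hj
  rw [heA i j hi hj, heB i j hi hj]
  exact pvCell_identity board exc board.length i j hi hj
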